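-- pv_equiv track=rewrite | github.com/suandave/hermes-arxiv-agent | extract_affiliation.py | merge_hyphen_continuation
-- ===== SOURCE A (Python) =====
-- def merge_hyphen_continuation(phrases: list[str]) -> list[str]:
--     """
--     合并跨行的连字符词：
--     'Repub-' + 'licof Korea2LG...' → 'Republic of Korea, LG Electronics...'
--     """
--     merged = []
--     i = 0
--     while i < len(phrases):
--         p = phrases[i]
--         # 如果当前短语以连字符结尾，尝试和下一个合并
--         while i + 1 < len(phrases) and p.endswith('-'):
--             p = p[:-1] + phrases[i + 1]
--             i += 1
--         merged.append(p)
--         i += 1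
--     return merged
-- ===== SOURCE B (Python) =====
-- def merge_hyphen_continuation(phrases: list[str]) -> list[str]:
--     """Single forward pass: merge each phrase into the accumulator's last
--     element while that element ends with a hyphen."""
--     merged = []
--     for p in phrases:
--         if merged and merged[-1].endswith('-'):
--             merged[-1] = merged[-1][:-1] + p
--         else:
--             merged.append(p)
--     return merged
-- ===== Notes on version B (the rewrite author's own statement) =====
-- stated objective: simpler
-- what changed: Replaces the nested index-driven while loops (inner look-ahead merging) with a single for-loop that folds each phrase into the accumulator's hyphen-ending last element.
import Mathlib
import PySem

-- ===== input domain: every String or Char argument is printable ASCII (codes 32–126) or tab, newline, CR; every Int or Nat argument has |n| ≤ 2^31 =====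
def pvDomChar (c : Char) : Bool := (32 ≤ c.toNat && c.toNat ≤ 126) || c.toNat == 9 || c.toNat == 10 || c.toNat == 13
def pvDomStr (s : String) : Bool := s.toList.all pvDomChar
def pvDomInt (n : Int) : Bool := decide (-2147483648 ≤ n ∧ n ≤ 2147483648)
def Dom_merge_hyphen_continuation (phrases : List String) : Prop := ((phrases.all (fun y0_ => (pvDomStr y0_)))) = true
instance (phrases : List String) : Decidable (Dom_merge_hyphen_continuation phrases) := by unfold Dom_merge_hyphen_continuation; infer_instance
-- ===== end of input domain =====

-- B replaces A's nested index-driven while loops by a single forward pass that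
-- folds each phrase into the accumulator's hyphen-ending last element (objective: simpler).

-- ===== PORT A =====
-- inner 'while i + 1 < len(phrases) and p.endswith('-')': absorb following
-- phrases into p while p ends with '-'; p[:-1] is p.toList.dropLast (exact,
-- cf. PySem.Str.slice_to_neg_one), '+' on strings is list append on toList.
def pvChainA (p : String) : List String → String × List String
  | [] => (p, [])
  | q :: rest =>
    if PySem.Str.endswith p "-" then
      pvChainA (String.ofList (p.toList.dropLast ++ q.toList)) rest
    else (p, q :: rest)

theorem pvChainA_len (p : String) (l : List String) :
    (pvChainA p l).2.length ≤ l.length := by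
  induction l generalizing p with
  | nil => simp [pvChainA]
  | cons q rest ih =>
    simp only [pvChainA]
    split
    · exact le_trans (ih _) (Nat.le_succ _)
    · simp

-- outer 'while i < len(phrases)': take the current phrase, run the inner
-- merge, append the result, continue after the consumed phrases.
def merge_hyphen_continuation (phrases : List String) : List String :=
  match phrases with
  | [] => []
  | p :: rest =>
    let pr := pvChainA p rest
    pr.1 :: merge_hyphen_continuation pr.2
termination_by phrases.length
decreasing_by
  simp only [List.length_cons]
  exact Nat.lt_succ_of_le (pvChainA_len p rest)

-- ===== PORT B =====
-- one step of B's for-loop: merged[-1] is acc.getLast?, in-place update of the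
-- last slot is dropLast ++ [new], append is acc ++ [p].
def pvStepB (acc : List String) (p : String) : List String :=
  match acc.getLast? with
  | some last =>
    if PySem.Str.endswith last "-" then
      acc.dropLast ++ [String.ofList (last.toList.dropLast ++ p.toList)]
    else acc ++ [p]
  | none => acc ++ [p]

def merge_hyphen_continuation_alt (phrases : List String) : List String :=
  phrases.foldl pvStepB []

-- ===== PRECONDITION & SPEC =====
def Spec_merge_hyphen_continuation (phrases : List String) (out : List String) : Prop := out = merge_hyphen_continuation_alt phrases
instance (phrases : List String) (out : List String) : Decidable (Spec_merge_hyphen_continuation phrases out) := by unfold Spec_merge_hyphen_continuation; infer_instance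

-- ===== CLAIM (what is proved, stated in full; the proofs are below) =====
def Claim_equal_merge_hyphen_continuation : Prop := ∀ (phrases : List String), Dom_merge_hyphen_continuation phrases → Spec_merge_hyphen_continuation phrases (merge_hyphen_continuation phrases)

-- ===== LEMMAS AND PROOFS =====

-- B's fold, started with a nonempty accumulator whose last element is p,
-- computes A's merge of p with the remaining phrases appended after acc.
theorem pvFold_eq (rest : List String) :
    ∀ (p : String) (acc : List String),
      rest.foldl pvStepB (acc ++ [p]) = acc ++ merge_hyphen_continuation (p :: rest) := by
  induction rest with
  | nil =>
    intro p acc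
    simp [merge_hyphen_continuation, pvChainA]
  | cons r rs ih =>
    intro p acc
    by_cases h : PySem.Chars.endswith p.toList ['-'] = true
    · have hstep : pvStepB (acc ++ [p]) r
          = acc ++ [String.ofList (p.toList.dropLast ++ r.toList)] := by
        simp [pvStepB, h]
      have hA : merge_hyphen_continuation (p :: r :: rs)
          = merge_hyphen_continuation (String.ofList (p.toList.dropLast ++ r.toList) :: rs) := by
        conv_lhs => rw [merge_hyphen_continuation]
        conv_rhs => rw [merge_hyphen_continuation]
        simp [pvChainA, h]
      rw [List.foldl_cons, hstep, ih, hA]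
    · have hstep : pvStepB (acc ++ [p]) r = (acc ++ [p]) ++ [r] := by
        simp [pvStepB, h]
      have hA : merge_hyphen_continuation (p :: r :: rs)
          = p :: merge_hyphen_continuation (r :: rs) := by
        conv_lhs => rw [merge_hyphen_continuation]
        simp [pvChainA, h]
      rw [List.foldl_cons, hstep, ih, hA]
      simp

-- ===== VERDICT (by name: the statement is the Claim_ definition above) =====
theorem merge_hyphen_continuation_spec : Claim_equal_merge_hyphen_continuation := by
  intro phrases _
  unfold Spec_merge_hyphen_continuation merge_hyphen_continuation_alt
  cases phrases with
  | nil => simp [merge_hyphen_continuation]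
  | cons p rest =>
    have h := pvFold_eq rest p []
    simpa [pvStepB] using h.symm
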